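-- pv_equiv track=rewrite | github.com/guilhermesantos18/Codewars | 53.py | string_transformer
-- ===== SOURCE A (Python) =====
-- def string_transformer(s):
--     s = s.split()
--     lista_palavras = []
--     palavras_maiusculas = ''
--     palavras_minusculas = ''
--     for palavra in s[::-1]:
--         for letra in palavra:
--             if letra.islower():
--                 palavras_maiusculas += letra.upper()
--             elif letra.isupper():
--                 palavras_minusculas += letra.lower()
--         lista_palavras.append(palavras_minusculas + palavras_maiusculas)
--         palavras_maiusculas = ''
--         palavras_minusculas = ''
--     return ' '.join(lista_palavras)
-- ===== SOURCE B (Python) =====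
-- def string_transformer(s):
--     out = []
--     for word in reversed(s.split()):
--         lowers = ''.join(c.lower() for c in word if c.isupper())
--         uppers = ''.join(c.upper() for c in word if c.islower())
--         out.append(lowers + uppers)
--     return ' '.join(out)
-- ===== Notes on version B (the rewrite author's own statement) =====
-- stated objective: simpler
-- what changed: Replaces A's single branching pass with two mutable string accumulators per word by two filtered map passes (uppercase letters lowered, then lowercase letters raised) built independently and concatenated.
import Mathlib
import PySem

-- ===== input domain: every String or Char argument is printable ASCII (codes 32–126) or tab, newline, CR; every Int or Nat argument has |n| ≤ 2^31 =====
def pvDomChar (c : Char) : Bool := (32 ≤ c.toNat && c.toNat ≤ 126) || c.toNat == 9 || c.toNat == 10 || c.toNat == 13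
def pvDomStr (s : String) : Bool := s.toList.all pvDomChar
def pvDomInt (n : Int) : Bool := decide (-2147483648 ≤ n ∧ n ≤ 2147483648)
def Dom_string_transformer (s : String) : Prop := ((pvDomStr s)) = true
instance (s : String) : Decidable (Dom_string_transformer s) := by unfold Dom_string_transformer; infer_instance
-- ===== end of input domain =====

-- B differs from A by decomposition: two filtered passes per word instead of one branching
-- pass with two growing accumulators (objective: simpler).

-- ===== PORT A =====
-- inner loop over the letters of one word, state = (palavras_maiusculas, palavras_minusculas)
def stA_inner (mm : List Char × List Char) (letra : Char) : List Char × List Char :=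
  if PySem.Chars.islower letra then (mm.1 ++ [PySem.Chars.upperChar letra], mm.2)
  else if PySem.Chars.isupper letra then (mm.1, mm.2 ++ [PySem.Chars.lowerChar letra])
  else mm

def string_transformer (s : String) : String :=
  let words := PySem.Str.split₀ s
  -- s[::-1] : PySem.List.slice? words none none (-1) = some words.reverse (slice?_none_none_neg_one)
  let rev := words.reverse
  let lista_palavras :=
    rev.foldl (fun (acc : List String) palavra =>
      let mm := palavra.toList.foldl stA_inner ([], [])
      acc ++ [String.ofList (mm.2 ++ mm.1)]) []
  PySem.Str.join " " lista_palavras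

-- ===== PORT B =====
def stB_word (w : String) : String :=
  String.ofList
    ((w.toList.filter PySem.Chars.isupper).map PySem.Chars.lowerChar
      ++ (w.toList.filter PySem.Chars.islower).map PySem.Chars.upperChar)

def string_transformer_alt (s : String) : String :=
  PySem.Str.join " " (((PySem.Str.split₀ s).reverse).map stB_word)

-- ===== PRECONDITION & SPEC =====
def Spec_string_transformer (s : String) (out : String) : Prop := out = string_transformer_alt s
instance (s : String) (out : String) : Decidable (Spec_string_transformer s out) := by unfold Spec_string_transformer; infer_instance

-- ===== CLAIM (what is proved, stated in full; the proofs are below) =====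
def Claim_equal_string_transformer : Prop := ∀ (s : String), Dom_string_transformer s → Spec_string_transformer s (string_transformer s)

-- ===== LEMMAS AND PROOFS =====

theorem stA_inner_eq (cs : List Char) (a b : List Char) :
    cs.foldl stA_inner (a, b) =
      (a ++ (cs.filter PySem.Chars.islower).map PySem.Chars.upperChar,
       b ++ (cs.filter PySem.Chars.isupper).map PySem.Chars.lowerChar) := by
  induction cs generalizing a b with
  | nil => simp
  | cons c cs ih =>
    by_cases hl : PySem.Chars.islower c
    · have hu : PySem.Chars.isupper c = false := by
        simp [PySem.Chars.islower] at hl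
        simp [PySem.Chars.isupper]
        intro _; exact lt_of_lt_of_le (by decide) hl.1
      simp [stA_inner, hl, hu, ih]
    · by_cases hu : PySem.Chars.isupper c
      · simp [stA_inner, hl, hu, ih]
      · simp [stA_inner, hl, hu, ih]

theorem stA_outer_eq (xs : List String) (acc : List String) :
    xs.foldl (fun acc palavra =>
        acc ++ [String.ofList ((List.foldl stA_inner ([], []) palavra.toList).2
          ++ (List.foldl stA_inner ([], []) palavra.toList).1)]) acc
      = acc ++ xs.map stB_word := by
  induction xs generalizing acc with
  | nil => simp
  | cons x xs ih =>
    rw [List.foldl_cons, ih]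
    simp only [stA_inner_eq, stB_word, List.nil_append, List.map_cons,
      List.append_assoc, List.singleton_append]

-- ===== VERDICT (by name: the statement is the Claim_ definition above) =====
theorem string_transformer_spec : Claim_equal_string_transformer := by
  intro s _
  unfold Spec_string_transformer string_transformer string_transformer_alt
  simp only []
  congr 1
  rw [stA_outer_eq]
  simp
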